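-- pv_equiv track=rewrite | github.com/AsteriskAmpersand/Material-Editing | utils/MaterialEnumeration.py | generatePermutators
-- ===== SOURCE A (Python) =====
-- def basicDenum(stringSet):
--     superset = set()
--     for s in stringSet:
--         for i in range(1000):
--             superset.add(s+"__%d"%i)
--     return superset
--
-- def stochasticDenum(densitySets):
--     new = set()
--     for key,group in densitySets.items():
--         indices = []
--         for string in group:
--             candidate = string.split("__")[-1]
--             try:
--                 c = int(candidate)
--                 if c>10**5:
--                     continue
--             except:
--                 continue
--             indices.append(c)
--         if indices:
--             if max(indices) > 999:
--                 #histoplot(key,dict(Counter(indices)))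
--                 for i in range(max(indices)+1):
--                     new.add(key+"__%d"%i)
--     return new
--
-- def generatePermutators(stringSet):
--     anonStr = {}
--     for string in stringSet:
--         parts = string.split("__")
--         if len(parts) > 1:
--             result = "__".join(parts[:-1])
--             if result not in anonStr:
--                 anonStr[result] = []
--             anonStr[result].append(string)
--     basicPerms = basicDenum(anonStr.keys())
--     stochasticPerms = stochasticDenum(anonStr)
--     return basicPerms.union(stochasticPerms).union(stringSet).union(anonStr.keys())
-- ===== SOURCE B (Python) =====
-- def generatePermutators(stringSet):
--     # One grouping pass keeping only a running maximum valid suffix index per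
--     # prefix (no group lists, no second parsing pass over grouped strings).
--     maxIdx = {}
--     for string in stringSet:
--         parts = string.split("__")
--         if len(parts) > 1:
--             key = "__".join(parts[:-1])
--             if key not in maxIdx:
--                 maxIdx[key] = None
--             try:
--                 c = int(parts[-1])
--             except ValueError:
--                 continue
--             if c <= 10**5 and (maxIdx[key] is None or c > maxIdx[key]):
--                 maxIdx[key] = c
--     basic = set()
--     for key in maxIdx:
--         for i in range(1000):
--             basic.add(key + "__%d" % i)
--     stoch = set()
--     for key, m in maxIdx.items():
--         if m is not None and m > 999:
--             for i in range(m + 1):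
--                 stoch.add(key + "__%d" % i)
--     return basic.union(stoch).union(stringSet).union(maxIdx)
-- ===== Notes on version B (the rewrite author's own statement) =====
-- stated objective: alternative
-- what changed: B's single grouping pass keeps only a running maximum valid suffix index per prefix instead of A's prefix->group-list dict, eliminating stochasticDenum's second split/parse pass over every grouped string and its index-list/max() computation; the expansion then reads the bound straight off the dict.
import Mathlib
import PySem

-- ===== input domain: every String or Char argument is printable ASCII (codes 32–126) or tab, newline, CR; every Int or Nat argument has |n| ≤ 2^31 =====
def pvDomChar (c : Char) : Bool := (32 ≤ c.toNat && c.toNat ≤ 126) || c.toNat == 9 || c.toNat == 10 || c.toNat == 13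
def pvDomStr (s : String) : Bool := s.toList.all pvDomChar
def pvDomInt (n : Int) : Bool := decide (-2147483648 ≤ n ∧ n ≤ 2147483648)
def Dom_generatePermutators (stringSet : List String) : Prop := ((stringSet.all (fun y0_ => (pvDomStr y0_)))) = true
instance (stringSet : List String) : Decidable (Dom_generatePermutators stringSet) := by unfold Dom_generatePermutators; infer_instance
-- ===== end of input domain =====

-- B replaces A's prefix→group-list dict plus stochasticDenum's second split/parse pass over
-- every grouped string (index list + max()) by one grouping pass that keeps only a running
-- maximum valid index per prefix; the expansion reads that bound straight off the dict
-- (objective: alternative decomposition, same cost).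

-- ===== PORT A =====
-- helper basicDenum (A's module helper)
def basicDenum (stringSet : List String) : PySem.Set String :=
  stringSet.foldl (fun superset s =>
      (PySem.List.pyRange 0 1000 1).foldl
        (fun sup i => PySem.Set.add sup (s ++ "__" ++ PySem.Int.toStr i)) superset)
    PySem.Set.empty

-- helper stochasticDenum (A's module helper).  'string.split("__")[-1]' : split? with the
-- non-empty separator "__" is always 'some' and its result is always a non-empty list, so
-- the '.getD' defaults are never used (exact).
def stochasticDenum (densitySets : PySem.Dict String (List String)) : PySem.Set String :=
  densitySets.items.foldl (fun new kg =>
      let indices : List Int := kg.2.foldl (fun idxs string =>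
          let candidate := PySem.List.pyGetD ((PySem.Str.split? string "__").getD []) (-1) ""
          match PySem.Int.ofStr? candidate with
          | none => idxs
          | some c => if c > 10 ^ 5 then idxs else idxs ++ [c]) []
      if indices = [] then new
      else
        match PySem.List.max? indices (fun x => x) with
        | none => new
        | some m =>
          if m > 999 then
            (PySem.List.pyRange 0 (m + 1) 1).foldl
              (fun n i => PySem.Set.add n (kg.1 ++ "__" ++ PySem.Int.toStr i)) new
          else new)
    PySem.Set.empty

-- A's grouping-loop body ('for string in stringSet: …' in generatePermutators)
def aGroupStep (anonStr : PySem.Dict String (List String)) (string : String) :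
    PySem.Dict String (List String) :=
  let parts := (PySem.Str.split? string "__").getD []   -- sep "__" ≠ "": always 'some' (exact)
  if parts.length > 1 then
    let result := PySem.Str.join "__" (PySem.List.slice parts none (some (-1)))
    let anonStr := if anonStr.contains result then anonStr else anonStr.insert result []
    anonStr.modify result [] (fun g => g ++ [string])
  else anonStr

def generatePermutators (stringSet : List String) : List String :=
  let anonStr := stringSet.foldl aGroupStep (PySem.Dict.mk [])
  let basicPerms := basicDenum anonStr.keys
  let stochasticPerms := stochasticDenum anonStr
  PySem.Set.union (PySem.Set.union (PySem.Set.union basicPerms stochasticPerms) stringSet)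
    anonStr.keys

-- ===== PORT B =====
-- B's single scanning pass: dict prefix → running maximum valid suffix index (None = no
-- valid index yet); Python's 'and' ported as nested ifs; same '.getD' remarks as in port A.
def bScanStep (maxIdx : PySem.Dict String (Option Int)) (string : String) :
    PySem.Dict String (Option Int) :=
  let parts := (PySem.Str.split? string "__").getD []
  if parts.length > 1 then
    let key := PySem.Str.join "__" (PySem.List.slice parts none (some (-1)))
    let maxIdx := if maxIdx.contains key then maxIdx else maxIdx.insert key none
    match PySem.Int.ofStr? (PySem.List.pyGetD parts (-1) "") with
    | none => maxIdx
    | some c =>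
      if c ≤ 10 ^ 5 then
        match maxIdx.getD key none with
        | none => maxIdx.insert key (some c)
        | some m => if m < c then maxIdx.insert key (some c) else maxIdx
      else maxIdx
  else maxIdx

-- 'for key in maxIdx: for i in range(1000): out.add(…)' body
def bBase (out : PySem.Set String) (key : String) : PySem.Set String :=
  (PySem.List.pyRange 0 1000 1).foldl
    (fun out i => PySem.Set.add out (key ++ "__" ++ PySem.Int.toStr i)) out

-- 'for key, m in maxIdx.items(): …' body
def bExpand (out : PySem.Set String) (km : String × Option Int) : PySem.Set String :=
  match km.2 with
  | none => out
  | some m =>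
    if m > 999 then
      (PySem.List.pyRange 0 (m + 1) 1).foldl
        (fun out i => PySem.Set.add out (km.1 ++ "__" ++ PySem.Int.toStr i)) out
    else out

def generatePermutators_alt (stringSet : List String) : List String :=
  let maxIdx := stringSet.foldl bScanStep (PySem.Dict.mk [])
  let basic := maxIdx.keys.foldl bBase PySem.Set.empty
  let stoch := maxIdx.items.foldl bExpand PySem.Set.empty
  PySem.Set.union (PySem.Set.union (PySem.Set.union basic stoch) stringSet) maxIdx.keys

-- ===== PRECONDITION & SPEC =====
def Spec_generatePermutators (stringSet : List String) (out : List String) : Prop := out = generatePermutators_alt stringSet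
instance (stringSet : List String) (out : List String) : Decidable (Spec_generatePermutators stringSet out) := by unfold Spec_generatePermutators; infer_instance

-- ===== CLAIM (what is proved, stated in full; the proofs are below) =====
def Claim_equal_generatePermutators : Prop := ∀ (stringSet : List String), Dom_generatePermutators stringSet → Spec_generatePermutators stringSet (generatePermutators stringSet)

-- ===== LEMMAS AND PROOFS =====

-- the index a string contributes: parse of its last "__"-part
def pvParse (string : String) : Option Int :=
  PySem.Int.ofStr? (PySem.List.pyGetD ((PySem.Str.split? string "__").getD []) (-1) "")

-- running maximum of the valid (≤ 10^5) indices contributed so far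
def pvStep (o : Option Int) (string : String) : Option Int :=
  match pvParse string with
  | none => o
  | some c =>
    if c > 10 ^ 5 then o
    else match o with
      | none => some c
      | some m => if m < c then some c else some m

def pvVm (g : List String) : Option Int := g.foldl pvStep none

-- B's dict is A's dict with every group compressed to its running maximum
def pvMapD (d : PySem.Dict String (List String)) : PySem.Dict String (Option Int) :=
  PySem.Dict.mk (d.items.map (fun p => (p.1, pvVm p.2)))

-- A's index-collecting loop body in stochasticDenum (definitionally the port's lambda)
def pvIdxStep (idxs : List Int) (string : String) : List Int :=
  match pvParse string with
  | none => idxs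
  | some c => if c > 10 ^ 5 then idxs else idxs ++ [c]

-- A's per-item loop body in stochasticDenum (definitionally the port's lambda)
def pvABody (new : PySem.Set String) (kg : String × List String) : PySem.Set String :=
  let indices := kg.2.foldl pvIdxStep []
  if indices = [] then new
  else
    match PySem.List.max? indices (fun x => x) with
    | none => new
    | some m =>
      if m > 999 then
        (PySem.List.pyRange 0 (m + 1) 1).foldl
          (fun n i => PySem.Set.add n (kg.1 ++ "__" ++ PySem.Int.toStr i)) new
      else new

-- the block of strings one dict entry contributes
def pvChunk (km : String × Option Int) : List String :=
  match km.2 with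
  | none => []
  | some m =>
    if m > 999 then
      (PySem.List.pyRange 0 (m + 1) 1).map (fun i => km.1 ++ "__" ++ PySem.Int.toStr i)
    else []

theorem pvVm_append_singleton (g : List String) (s : String) :
    pvVm (g ++ [s]) = pvStep (pvVm g) s := by
  simp [pvVm, List.foldl_append]

theorem pv_get?_aux (k : String) : ∀ (l : List (String × List String)),
    Option.map (fun x => x.2) (List.find? (fun p => p.1 == k) (l.map (fun p => (p.1, pvVm p.2))))
      = (Option.map (fun x => x.2) (List.find? (fun p => p.1 == k) l)).map pvVm
  | [] => rfl
  | p :: t => by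
    by_cases hp : (p.1 == k) = true
    · simp [hp]
    · have hp' : (p.1 == k) = false := by simpa using hp
      simp only [List.map_cons, List.find?_cons, hp']
      exact pv_get?_aux k t

theorem pv_get?_mapD (d : PySem.Dict String (List String)) (k : String) :
    (pvMapD d).get? k = (d.get? k).map pvVm := by
  obtain ⟨l⟩ := d
  exact pv_get?_aux k l

theorem pv_contains_mapD (d : PySem.Dict String (List String)) (k : String) :
    (pvMapD d).contains k = d.contains k := by
  rw [PySem.Dict.contains_eq_isSome_get?, PySem.Dict.contains_eq_isSome_get?, pv_get?_mapD]
  cases d.get? k <;> rfl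

theorem pv_keys_mapD (d : PySem.Dict String (List String)) :
    (pvMapD d).keys = d.keys := by
  obtain ⟨l⟩ := d
  simp [pvMapD, PySem.Dict.keys, List.map_map, Function.comp]

theorem pv_mapD_insert (d : PySem.Dict String (List String)) (k : String) (g : List String) :
    pvMapD (d.insert k g) = (pvMapD d).insert k (pvVm g) := by
  obtain ⟨l⟩ := d
  simp only [pvMapD, PySem.Dict.insert]
  have hc : (PySem.Dict.mk (l.map (fun p => (p.1, pvVm p.2)))).contains k
      = (PySem.Dict.mk l).contains k := pv_contains_mapD (PySem.Dict.mk l) k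
  by_cases h : (PySem.Dict.mk l).contains k = true
  · simp only [h, hc, if_true, List.map_map]
    congr 1
    apply List.map_congr_left
    intro p _
    by_cases hp : (p.1 == k) = true <;> simp [Function.comp, hp]
  · rw [if_neg h, if_neg (by rw [hc]; exact h)]
    simp

theorem pv_map_id_aux {κ ν : Type} [BEq κ] [LawfulBEq κ] (k : κ) (v : ν) :
    ∀ (l : List (κ × ν)), (l.map Prod.fst).Nodup →
      (l.find? (fun p => p.1 == k)).map (fun x => x.2) = some v →
      l.map (fun p => if (p.1 == k) = true then (k, v) else p) = l := by
  intro l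
  induction l with
  | nil => simp
  | cons p t ih =>
    intro hnd h
    simp only [List.map_cons, List.nodup_cons] at hnd
    by_cases hp : (p.1 == k) = true
    · simp only [List.find?_cons, hp] at h
      have hk : p.1 = k := by simpa using hp
      have hv : v = p.2 := by simpa using h.symm
      have hnone : ∀ q ∈ t, (q.1 == k) = false := by
        intro q hq
        have : q.1 ≠ k := by
          intro hqk
          exact hnd.1 (by rw [hk, ← hqk]; exact List.mem_map_of_mem hq)
        simpa using this
      have htail : List.map (fun q => if (q.1 == k) = true then (k, v) else q) t = t := by
        conv_rhs => rw [← List.map_id t]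
        exact List.map_congr_left (fun q hq => by simp [hnone q hq])
      simp only [List.map_cons, hp, if_true, htail]
      simp [← hk, hv]
    · simp only [List.find?_cons, hp] at h
      simp only [List.map_cons, if_neg hp, ih hnd.2 h]

theorem pv_contains_of_get? {κ ν : Type} [BEq κ] (d : PySem.Dict κ ν) (k : κ) (v : ν)
    (h : d.get? k = some v) : d.contains k = true := by
  rw [PySem.Dict.contains_eq_isSome_get?, h]; rfl

theorem pv_insert_same {κ ν : Type} [BEq κ] [LawfulBEq κ] (d : PySem.Dict κ ν) (k : κ) (v : ν)
    (hnd : d.keys.Nodup) (h : d.get? k = some v) : d.insert k v = d := by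
  have hc := pv_contains_of_get? d k v h
  obtain ⟨l⟩ := d
  simp only [PySem.Dict.get?, PySem.Dict.keys] at h hnd
  simp only [PySem.Dict.insert, hc, if_pos]
  exact congrArg PySem.Dict.mk (pv_map_id_aux k v l hnd h)

-- max of A's collected index list = B's running maximum
theorem pv_max_fold : ∀ (g : List String) (idxs : List Int),
    PySem.List.max? (g.foldl pvIdxStep idxs) (fun x => x)
      = g.foldl pvStep (PySem.List.max? idxs (fun x => x))
  | [], _ => rfl
  | s :: t, idxs => by
    simp only [List.foldl_cons]
    rw [pv_max_fold t (pvIdxStep idxs s)]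
    congr 1
    unfold pvIdxStep pvStep
    cases hp : pvParse s with
    | none => rfl
    | some c =>
      have h10 : (10:ℤ) ^ 5 = 100000 := by norm_num
      by_cases h5 : (100000:ℤ) < c
      · simp [h10, h5]
      · simp only [h10, if_neg h5]
        simp only [PySem.List.max?, List.foldl_append, List.foldl_cons, List.foldl_nil]
        split
        · rename_i h; rw [h]
        · rename_i m h; rw [h]

theorem pv_max_indices (g : List String) :
    PySem.List.max? (g.foldl pvIdxStep []) (fun x => x) = pvVm g := pv_max_fold g []

theorem pvABody_eq (new : PySem.Set String) (kg : String × List String) :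
    pvABody new kg = PySem.Set.update new (pvChunk (kg.1, pvVm kg.2)) := by
  have hidx := pv_max_indices kg.2
  by_cases hnil : kg.2.foldl pvIdxStep [] = []
  · have hvm : pvVm kg.2 = none := by rw [← hidx, hnil]; rfl
    simp [pvABody, hnil, pvChunk, hvm]
  · simp only [pvABody, if_neg hnil, hidx]
    cases hv : pvVm kg.2 with
    | none => simp [pvChunk]
    | some m =>
      by_cases h9 : m > 999
      · simp only [pvChunk, h9, if_pos]
        rw [PySem.Set.update_map_eq_foldl_add]
      · simp [pvChunk, h9]

theorem pvBExpand_eq (out : PySem.Set String) (km : String × Option Int) :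
    bExpand out km = PySem.Set.update out (pvChunk km) := by
  unfold bExpand pvChunk
  cases km.2 with
  | none => rfl
  | some m =>
    by_cases h9 : m > 999
    · simp only [h9, if_pos]
      rw [PySem.Set.update_map_eq_foldl_add]
    · simp [h9]

theorem pv_foldl_update {β : Type} (f : β → List String) :
    ∀ (l : List β) (s : PySem.Set String),
      l.foldl (fun s b => PySem.Set.update s (f b)) s = PySem.Set.update s (l.flatMap f)
  | [], _ => rfl
  | b :: t, s => by
    simp only [List.foldl_cons, List.flatMap_cons, PySem.Set.update_append]
    exact pv_foldl_update f t _

theorem pv_nodup_step (d : PySem.Dict String (List String)) (s : String)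
    (hnd : d.keys.Nodup) : (aGroupStep d s).keys.Nodup := by
  unfold aGroupStep
  set parts := (PySem.Str.split? s "__").getD [] with hparts
  by_cases hlen : parts.length > 1
  · simp only [if_pos hlen]
    set key := PySem.Str.join "__" (PySem.List.slice parts none (some (-1))) with hkey
    by_cases hc : d.contains key = true
    · simp only [hc, if_true]
      rw [show d.modify key [] (fun g => g ++ [s]) = d.insert key (d.getD key [] ++ [s]) from rfl,
        PySem.Dict.keys_insert_of_contains _ _ hc]
      exact hnd
    · rw [if_neg hc]
      have hkeys : (d.insert key []).keys = d.keys ++ [key] :=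
        PySem.Dict.keys_insert_of_not_contains _ _ (by simpa using hc)
      have hcc : (d.insert key []).contains key = true := PySem.Dict.contains_insert_self d key []
      rw [show (d.insert key []).modify key [] (fun g => g ++ [s])
          = (d.insert key []).insert key ((d.insert key []).getD key [] ++ [s]) from rfl,
        PySem.Dict.keys_insert_of_contains _ _ hcc, hkeys]
      have hnk : key ∉ d.keys := by
        rw [PySem.Dict.contains_eq_decide_mem_keys] at hc
        simpa using hc
      simp only [List.nodup_append]
      refine ⟨hnd, by simp, ?_⟩
      intro a ha b hb
      have hb' : b = key := by simpa using hb
      subst hb'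
      exact fun hab => hnk (hab ▸ ha)
  · simpa [if_neg hlen] using hnd

theorem pv_mapD_step (d : PySem.Dict String (List String)) (s : String)
    (hnd : d.keys.Nodup) : pvMapD (aGroupStep d s) = bScanStep (pvMapD d) s := by
  unfold aGroupStep bScanStep
  set parts := (PySem.Str.split? s "__").getD [] with hparts
  by_cases hlen : parts.length > 1
  · simp only [if_pos hlen]
    set key := PySem.Str.join "__" (PySem.List.slice parts none (some (-1))) with hkey
    rw [pv_contains_mapD]
    -- the 'ensure key present' step commutes with pvMapD
    have hens : (if d.contains key = true then pvMapD d else (pvMapD d).insert key none)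
        = pvMapD (if d.contains key = true then d else d.insert key []) := by
      by_cases hc : d.contains key = true
      · simp [hc]
      · simp only [if_neg hc, pv_mapD_insert]
        rfl
    rw [hens]
    set E := if d.contains key = true then d else d.insert key [] with hE
    have hndE : E.keys.Nodup := by
      by_cases hc : d.contains key = true
      · simp [hE, hc, hnd]
      · rw [hE, if_neg hc,
          PySem.Dict.keys_insert_of_not_contains _ _ (by simpa using hc)]
        have hnk : key ∉ d.keys := by
          rw [PySem.Dict.contains_eq_decide_mem_keys] at hc
          simpa using hc
        simp only [List.nodup_append]
        refine ⟨hnd, by simp, ?_⟩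
        intro a ha b hb
        have hb' : b = key := by simpa using hb
        subst hb'
        exact fun hab => hnk (hab ▸ ha)
    have hcE : E.contains key = true := by
      by_cases hc : d.contains key = true
      · simpa [hE, hc] using hc
      · rw [hE, if_neg hc]; exact PySem.Dict.contains_insert_self d key []
    obtain ⟨g, hg⟩ : ∃ g, E.get? key = some g := by
      rw [PySem.Dict.contains_eq_isSome_get?] at hcE
      exact Option.isSome_iff_exists.mp hcE
    have hgD : E.getD key [] = g := by rw [PySem.Dict.getD_eq_get?_getD, hg]; rfl
    have hmod : E.modify key [] (fun g => g ++ [s]) = E.insert key (g ++ [s]) := by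
      rw [show E.modify key [] (fun g => g ++ [s]) = E.insert key (E.getD key [] ++ [s]) from rfl, hgD]
    have hget : (pvMapD E).get? key = some (pvVm g) := by rw [pv_get?_mapD, hg]; rfl
    have hgetD : (pvMapD E).getD key none = pvVm g := by
      rw [PySem.Dict.getD_eq_get?_getD, hget]; rfl
    have hndME : (pvMapD E).keys.Nodup := by rw [pv_keys_mapD]; exact hndE
    rw [hmod, pv_mapD_insert, pvVm_append_singleton, hgetD]
    rw [show PySem.Int.ofStr? (PySem.List.pyGetD parts (-1) "") = pvParse s from rfl]
    unfold pvStep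
    cases hp : pvParse s with
    | none =>
      dsimp only
      exact pv_insert_same _ key _ hndME hget
    | some c =>
      dsimp only
      by_cases h5 : c > 10 ^ 5
      · rw [if_pos h5, if_neg (by omega : ¬ c ≤ 10 ^ 5)]
        exact pv_insert_same _ key _ hndME hget
      · rw [if_neg h5, if_pos (by omega : c ≤ 10 ^ 5)]
        cases hv : pvVm g with
        | none => rfl
        | some m =>
          by_cases hm : m < c
          · simp [hm]
          · simp only [if_neg hm]
            exact pv_insert_same _ key _ hndME (by rw [hget, hv])
  · simp only [if_neg hlen]

theorem pv_fold : ∀ (ss : List String) (d : PySem.Dict String (List String)),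
    d.keys.Nodup →
    pvMapD (ss.foldl aGroupStep d) = ss.foldl bScanStep (pvMapD d)
      ∧ (ss.foldl aGroupStep d).keys.Nodup
  | [], _, hnd => ⟨rfl, hnd⟩
  | s :: t, d, hnd => by
    simp only [List.foldl_cons]
    obtain ⟨h1, h2⟩ := pv_fold t (aGroupStep d s) (pv_nodup_step d s hnd)
    exact ⟨by rw [h1, pv_mapD_step d s hnd], h2⟩

-- ===== VERDICT (by name: the statement is the Claim_ definition above) =====
theorem generatePermutators_spec : Claim_equal_generatePermutators := by
  intro ss _
  unfold Spec_generatePermutators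
  obtain ⟨hfold, hnodA⟩ := pv_fold ss (PySem.Dict.mk []) (by simp [PySem.Dict.keys])
  rw [show pvMapD (PySem.Dict.mk []) = PySem.Dict.mk [] from rfl] at hfold
  set dA := ss.foldl aGroupStep (PySem.Dict.mk []) with hdA
  have hA : generatePermutators ss = PySem.Set.update (PySem.Set.update
      (PySem.Set.update (basicDenum dA.keys) (stochasticDenum dA)) ss) dA.keys := rfl
  have hB : generatePermutators_alt ss = PySem.Set.update (PySem.Set.update
      (PySem.Set.update ((ss.foldl bScanStep (PySem.Dict.mk [])).keys.foldl bBase PySem.Set.empty)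
        ((ss.foldl bScanStep (PySem.Dict.mk [])).items.foldl bExpand PySem.Set.empty)) ss)
      (ss.foldl bScanStep (PySem.Dict.mk [])).keys := rfl
  rw [hA, hB, ← hfold, pv_keys_mapD]
  -- A's stochastic pass equals B's expansion pass, per-item
  have hstochA : stochasticDenum dA
      = PySem.Set.update PySem.Set.empty
          (dA.items.flatMap (fun kg => pvChunk (kg.1, pvVm kg.2))) := by
    rw [show stochasticDenum dA = dA.items.foldl pvABody PySem.Set.empty from rfl,
      show pvABody = (fun s kg => PySem.Set.update s (pvChunk (kg.1, pvVm kg.2)))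
        from funext fun s => funext fun kg => pvABody_eq s kg,
      pv_foldl_update]
  have hstochB : (pvMapD dA).items.foldl bExpand PySem.Set.empty
      = PySem.Set.update PySem.Set.empty
          (dA.items.flatMap (fun kg => pvChunk (kg.1, pvVm kg.2))) := by
    rw [show bExpand = (fun s km => PySem.Set.update s (pvChunk km))
        from funext fun s => funext fun km => pvBExpand_eq s km,
      pv_foldl_update,
      show (pvMapD dA).items.flatMap pvChunk
          = dA.items.flatMap (fun p => pvChunk (p.1, pvVm p.2)) by
        simp [pvMapD, List.flatMap_map]]
  rw [hstochA, hstochB,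
    show basicDenum dA.keys = dA.keys.foldl bBase PySem.Set.empty from rfl]
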